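-- pv_equiv track=rewrite | github.com/rolandjansky/athena | Database/EventIndex/EventIndexProducer/python/compressB64.py | compressB64
-- ===== SOURCE A (Python) =====
-- _B64_alphabet = ("ABCDEFGHIJKLMNOPQRSTUVWXYZ"
--                  "abcdefghijklmnopqrstuvwxyz"
--                  "0123456789+/")
--
-- def _toB64(n):
--     s = ""
--     while n > 63:
--         s = _B64_alphabet[n % 64] + s
--         n = n//64
--     s = _B64_alphabet[n % 64] + s
--     return s
--
-- def compressB64(s):
--     """Encodes a string of zeroes and ones using a RLE method.
--
--     s is the string to encode.
--
--     Consecutive zeroes are encoded by its repetition count in Base64.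
--     Ones are copied to output substituted by exclamation marks.
--
--     Example:
--            input:   0001100001001101010000
--            output:  D!!E!C!!B!B!E
--
--     Effective compression is only achieved when input is composed mostly
--     by zeroes.
--
--     The encoded string is returned.
--     """
--
--     count = 0
--     res = ""
--     for k in range(0, len(s)):
--         c = s[k]
--         if c == '0':
--             count += 1
--         else:
--             if count > 0:
--                 res += _toB64(count)
--             res += "!"
--             count = 0
--
--     if count > 0:
--         res += _toB64(count)
--
--     return res
-- ===== SOURCE B (Python) =====
-- import re
--
-- _B64_alphabet = ("ABCDEFGHIJKLMNOPQRSTUVWXYZ"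
--                  "abcdefghijklmnopqrstuvwxyz"
--                  "0123456789+/")
--
-- def _toB64(n):
--     s = ""
--     while n > 63:
--         s = _B64_alphabet[n % 64] + s
--         n = n//64
--     s = _B64_alphabet[n % 64] + s
--     return s
--
-- def compressB64(s):
--     return "!".join(_toB64(len(p)) if p else ""
--                     for p in re.split(r'[^0]', s))
-- ===== Notes on version B (the rewrite author's own statement) =====
-- stated objective: idiomatic
-- what changed: B replaces A's character-by-character counter loop by splitting the input on every non-'0' character (re.split) and joining the Base64-encoded run lengths with '!'.
import Mathlib
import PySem

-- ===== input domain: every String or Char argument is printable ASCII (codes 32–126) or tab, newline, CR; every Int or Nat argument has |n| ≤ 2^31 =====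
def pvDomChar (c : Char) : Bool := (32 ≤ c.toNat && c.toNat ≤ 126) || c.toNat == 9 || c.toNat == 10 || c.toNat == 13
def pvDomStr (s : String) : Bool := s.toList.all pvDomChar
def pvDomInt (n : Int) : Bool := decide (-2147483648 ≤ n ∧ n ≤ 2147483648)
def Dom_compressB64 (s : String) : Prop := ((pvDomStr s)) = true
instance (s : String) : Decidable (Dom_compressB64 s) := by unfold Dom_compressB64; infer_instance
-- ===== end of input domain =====

-- B rewrites A's counter loop as split-on-non-'0' + join with '!' (idiomatic decomposition; same cost).

-- shared helper `_toB64` (kept unchanged in B, per its source)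
def b64Alphabet : List Char :=
  ("ABCDEFGHIJKLMNOPQRSTUVWXYZ" ++ "abcdefghijklmnopqrstuvwxyz" ++ "0123456789+/").toList

-- the `while n > 63` loop of `_toB64`, accumulating the string (as List Char) front-wards
def toB64go (n : Nat) (s : List Char) : List Char :=
  if h : n > 63 then toB64go (n / 64) (b64Alphabet.getD (n % 64) 'A' :: s)
  else b64Alphabet.getD (n % 64) 'A' :: s
decreasing_by exact Nat.div_lt_self (by omega) (by omega)

def toB64 (n : Nat) : List Char := toB64go n []

-- ===== PORT A =====
-- A's `for k in range(len(s))` loop over the characters, with state (count, res)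
def compLoopA : List Char → Nat → List Char → List Char
  | [], count, res => if count > 0 then res ++ toB64 count else res
  | c :: rest, count, res =>
      if c = '0' then compLoopA rest (count + 1) res
      else compLoopA rest 0 (res ++ (if count > 0 then toB64 count else []) ++ ['!'])

def compressB64 (s : String) : String := String.mk (compLoopA s.toList 0 [])

-- ===== PORT B =====
-- port of re.split(r'[^0]', s): split on every non-'0' character
def splitNonZero : List Char → List (List Char)
  | [] => [[]]
  | c :: rest =>
      if c = '0' then
        match splitNonZero rest with
        | p :: ps => (c :: p) :: ps
        | [] => [[c]]
      else [] :: splitNonZero rest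

-- port of `_toB64(len(p)) if p else ""`
def encPart (p : List Char) : List Char := if p.isEmpty then [] else toB64 p.length

-- port of "!".join
def joinBang : List (List Char) → List Char
  | [] => []
  | [p] => p
  | p :: q :: ps => p ++ '!' :: joinBang (q :: ps)

def compressB64_alt (s : String) : String :=
  String.mk (joinBang ((splitNonZero s.toList).map encPart))

-- ===== PRECONDITION & SPEC =====
def Spec_compressB64 (s : String) (out : String) : Prop := out = compressB64_alt s
instance (s : String) (out : String) : Decidable (Spec_compressB64 s out) := by unfold Spec_compressB64; infer_instance

-- ===== CLAIM (what is proved, stated in full; the proofs are below) =====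
def Claim_equal_compressB64 : Prop := ∀ (s : String), Dom_compressB64 s → Spec_compressB64 s (compressB64 s)

-- ===== LEMMAS AND PROOFS =====

def encN (n : Nat) : List Char := if n = 0 then [] else toB64 n

lemma encPart_eq (p : List Char) : encPart p = encN p.length := by
  simp [encPart, encN]

lemma splitNonZero_ne_nil (l : List Char) : splitNonZero l ≠ [] := by
  cases l with
  | nil => simp [splitNonZero]
  | cons c rest =>
    simp only [splitNonZero]
    split
    · cases h : splitNonZero rest <;> simp
    · simp

lemma compLoopA_append (l : List Char) : ∀ (count : Nat) (res : List Char),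
    compLoopA l count res = res ++ compLoopA l count [] := by
  induction l with
  | nil => intro count res; simp [compLoopA]; split <;> simp
  | cons c rest ih =>
    intro count res
    simp only [compLoopA]
    split
    · exact ih _ _
    · rw [ih 0 ((res ++ (if count > 0 then toB64 count else [])) ++ ['!']),
          ih 0 (([] ++ (if count > 0 then toB64 count else [])) ++ ['!'])]
      simp

lemma compLoopA_eq (l : List Char) : ∀ (count : Nat),
    compLoopA l count [] =
      match splitNonZero l with
      | p :: ps => joinBang (encN (count + p.length) :: ps.map encPart)
      | [] => [] := by
  induction l with
  | nil =>
    intro count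
    simp only [compLoopA, splitNonZero, joinBang, encN, List.length_nil, Nat.add_zero,
      List.map_nil, List.nil_append]
    split <;> split <;> first | rfl | omega
  | cons c rest ih =>
    intro count
    simp only [compLoopA, splitNonZero]
    split
    · -- c = '0'
      rw [ih (count + 1)]
      cases h : splitNonZero rest with
      | nil => exact absurd h (splitNonZero_ne_nil rest)
      | cons p ps =>
        simp only [List.length_cons]
        have e : count + 1 + p.length = count + (p.length + 1) := by omega
        rw [e]
    · -- c ≠ '0'
      rw [compLoopA_append, ih 0]
      cases h : splitNonZero rest with
      | nil => exact absurd h (splitNonZero_ne_nil rest)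
      | cons p ps =>
        simp only [List.length_nil, Nat.add_zero, Nat.zero_add, List.map_cons]
        rw [encPart_eq]
        cases hc : count with
        | zero => simp [encN, joinBang]
        | succ k => simp [encN, joinBang]

-- ===== VERDICT (by name: the statement is the Claim_ definition above) =====
theorem compressB64_spec : Claim_equal_compressB64 := by
  intro s _
  unfold Spec_compressB64 compressB64 compressB64_alt
  rw [compLoopA_eq]
  cases h : splitNonZero s.toList with
  | nil => exact absurd h (splitNonZero_ne_nil _)
  | cons p ps => simp [encPart_eq]
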